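-- pv_equiv track=rewrite | github.com/fatcrapinmybutt/fredprime-legal-system | tools/adversarial_signal_suite/LITIGATIONOS_ADVERSARIAL_SIGNAL_SUITE_v2_2.py | split_text_segments
-- ===== SOURCE A (Python) =====
-- from typing import Any, Dict, Iterable, List, Optional, Tuple
--
-- def split_text_segments(text: str, segment_size: int, overlap: int) -> List[Tuple[int, int]]:
--     if not text:
--         return [(0, 0)]
--     step = max(1, segment_size - overlap)
--     segments = []
--     start = 0
--     length = len(text)
--     while start < length:
--         end = min(length, start + segment_size)
--         segments.append((start, end))
--         if end >= length:
--             break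
--         start += step
--     return segments
-- ===== SOURCE B (Python) =====
-- from typing import List, Tuple
--
-- def split_text_segments(text: str, segment_size: int, overlap: int) -> List[Tuple[int, int]]:
--     length = len(text)
--     if length == 0:
--         return [(0, 0)]
--     step = max(1, segment_size - overlap)
--     # last index whose segment start is inside the text
--     kcap = -(-length // step) - 1
--     # first index whose segment reaches the end of the text
--     k0 = max(0, -(-(length - segment_size) // step))
--     count = min(k0, kcap) + 1
--     return [(i * step, min(length, i * step + segment_size)) for i in range(count)]
-- ===== Notes on version B (the rewrite author's own statement) =====
-- stated objective: alternative
-- what changed: Replaced A's stateful while-loop-with-break by computing the segment count in closed form (ceiling divisions for the break index and the last in-range start) and emitting all boundary pairs with a single comprehension over range(count).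
import Mathlib
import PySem

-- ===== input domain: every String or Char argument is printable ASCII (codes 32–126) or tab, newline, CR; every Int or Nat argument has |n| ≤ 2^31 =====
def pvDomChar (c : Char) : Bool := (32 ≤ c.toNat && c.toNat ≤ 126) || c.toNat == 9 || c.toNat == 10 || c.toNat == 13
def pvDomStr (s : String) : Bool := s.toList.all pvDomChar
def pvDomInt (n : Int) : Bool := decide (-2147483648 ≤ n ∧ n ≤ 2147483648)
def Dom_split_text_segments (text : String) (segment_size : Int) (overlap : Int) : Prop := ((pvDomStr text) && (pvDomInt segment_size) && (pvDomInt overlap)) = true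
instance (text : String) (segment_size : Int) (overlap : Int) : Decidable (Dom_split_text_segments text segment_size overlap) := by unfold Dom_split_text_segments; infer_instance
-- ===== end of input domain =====

-- B replaces A's stateful while-loop-with-break by a closed-form segment count and a single comprehension (alternative decomposition).

-- ===== PORT A =====
-- the while loop of A; the `1 ≤ step` conjunct is only a totality guard (the call site always passes step = max 1 (ss-ov) ≥ 1)
def pvLoopA (len ss step start : Int) : List (Int × Int) :=
  if _h : start < len ∧ 1 ≤ step then
    let e := min len (start + ss)
    if len ≤ e then [(start, e)]
    else (start, e) :: pvLoopA len ss step (start + step)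
  else []
termination_by (len - start).toNat
decreasing_by omega

def split_text_segments (text : String) (segment_size : Int) (overlap : Int) : List (Int × Int) :=
  if text = "" then [(0, 0)]
  else pvLoopA (PySem.Str.len text) segment_size (max 1 (segment_size - overlap)) 0

-- ===== PORT B =====
def split_text_segments_alt (text : String) (segment_size : Int) (overlap : Int) : List (Int × Int) :=
  let length := PySem.Str.len text
  if length = 0 then [(0, 0)]
  else
    let step := max 1 (segment_size - overlap)
    let kcap := -(PySem.Int.floordiv (-length) step) - 1
    let k0 := max 0 (-(PySem.Int.floordiv (-(length - segment_size)) step))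
    let count := min k0 kcap + 1
    (PySem.List.pyRange 0 count).map (fun i => (i * step, min length (i * step + segment_size)))

-- ===== PRECONDITION & SPEC =====
def Spec_split_text_segments (text : String) (segment_size : Int) (overlap : Int) (out : List (Int × Int)) : Prop := out = split_text_segments_alt text segment_size overlap
instance (text : String) (segment_size : Int) (overlap : Int) (out : List (Int × Int)) : Decidable (Spec_split_text_segments text segment_size overlap out) := by unfold Spec_split_text_segments; infer_instance

-- ===== CLAIM (what is proved, stated in full; the proofs are below) =====
def Claim_equal_split_text_segments : Prop := ∀ (text : String) (segment_size : Int) (overlap : Int), Dom_split_text_segments text segment_size overlap → Spec_split_text_segments text segment_size overlap (split_text_segments text segment_size overlap)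

-- ===== LEMMAS AND PROOFS =====

-- ceiling-division bracket: c = ⌈a/step⌉ satisfies (c-1)*step < a ≤ c*step
lemma pvCeil_bracket (a step : Int) (hstep : 1 ≤ step) :
    (-(PySem.Int.floordiv (-a) step) - 1) * step < a ∧ a ≤ (-(PySem.Int.floordiv (-a) step)) * step := by
  have h := (PySem.Int.neg_floordiv_neg_eq_iff_of_pos (a := a) (b := step)
      (q := -(PySem.Int.floordiv (-a) step)) (by omega)).mp rfl
  exact ⟨by nlinarith [h.1], h.2⟩

-- core invariant: from start = k*step, A's loop emits exactly segments k, k+1, …, min (max 0 c0) (cc-1),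
-- where c0 = ⌈(len-ss)/step⌉ and cc = ⌈len/step⌉ are characterized by the bracket hypotheses
lemma pvLoopA_eq_range (len ss step c0 cc : Int) (hstep : 1 ≤ step)
    (hb0 : (c0 - 1) * step < len - ss ∧ len - ss ≤ c0 * step)
    (hbc : (cc - 1) * step < len ∧ len ≤ cc * step) :
    ∀ k : Int, 0 ≤ k → k ≤ min (max 0 c0) (cc - 1) →
      pvLoopA len ss step (k * step) =
        (PySem.List.pyRange k (min (max 0 c0) (cc - 1) + 1)).map
          (fun i => (i * step, min len (i * step + ss))) := by
  have mono : ∀ x y : Int, x ≤ y → x * step ≤ y * step := fun x y h =>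
    mul_le_mul_of_nonneg_right h (by omega)
  intro k hk0 hkM
  induction hwf : (min (max 0 c0) (cc - 1) - k).toNat using Nat.strong_induction_on
    generalizing k with
  | _ n ih =>
  have hlt : k * step < len := by
    have h1 := mono k (cc - 1) (by omega)
    omega
  rw [pvLoopA, dif_pos ⟨hlt, hstep⟩]
  by_cases hend : len ≤ min len (k * step + ss)
  · -- segment reaches the end of the text: k = M, loop breaks after this segment
    have hc0k : c0 ≤ k := by
      by_contra h
      have := mono k (c0 - 1) (by omega)
      omega
    have hkMeq : k = min (max 0 c0) (cc - 1) := by omega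
    simp only [if_pos hend]
    rw [PySem.List.pyRange_one_cons (by omega)]
    have hnil : PySem.List.pyRange (k + 1) (min (max 0 c0) (cc - 1) + 1) = [] := by
      rw [← hkMeq]; simp [pysem]
    rw [hnil]; simp
  · simp only [if_neg hend]
    by_cases hnext : (k + 1) * step < len
    · -- next start still inside the text and the current segment did not reach the end:
      -- k+1 stays below both bounds, recurse
      have hk1cc : k + 1 ≤ cc - 1 := by
        by_contra h
        have := mono cc (k + 1) (by omega)
        omega
      have hk1c0 : k + 1 ≤ c0 := by
        by_contra h
        have := mono c0 k (by omega)
        omega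
      have hrec := ih ((min (max 0 c0) (cc - 1) - (k + 1)).toNat) (by omega)
        (k + 1) (by omega) (by omega) rfl
      have hmul : (k + 1) * step = k * step + step := by ring
      rw [← hmul, hrec, PySem.List.pyRange_one_cons (show k < min (max 0 c0) (cc - 1) + 1 by omega)]
      simp
    · -- next start falls past the end: k = M, the loop exits via start ≥ length
      have hccK : cc - 1 ≤ k := by
        by_contra h
        have := mono (k + 1) (cc - 1) (by omega)
        omega
      have hkMeq : k = min (max 0 c0) (cc - 1) := by omega
      have hmul : (k + 1) * step = k * step + step := by ring
      rw [pvLoopA, dif_neg (by omega),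
        PySem.List.pyRange_one_cons (by omega)]
      have hnil : PySem.List.pyRange (k + 1) (min (max 0 c0) (cc - 1) + 1) = [] := by
        rw [← hkMeq]; simp [pysem]
      rw [hnil]; simp

-- ===== VERDICT (by name: the statement is the Claim_ definition above) =====
theorem split_text_segments_spec : Claim_equal_split_text_segments := by
  intro text ss ov _
  unfold Spec_split_text_segments split_text_segments split_text_segments_alt
  by_cases h0 : text = ""
  · simp [h0, PySem.Str.len_eq]
  · have hlen : 0 < PySem.Str.len text := by
      rw [PySem.Str.len_eq]
      have : text.toList ≠ [] := by
        simpa [String.toList_eq_nil_iff] using h0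
      have := List.length_pos_of_ne_nil this
      omega
    rw [if_neg h0, if_neg (by omega : ¬ PySem.Str.len text = 0)]
    have hstep : (1 : Int) ≤ max 1 (ss - ov) := le_max_left _ _
    have hb0 := pvCeil_bracket (PySem.Str.len text - ss) (max 1 (ss - ov)) hstep
    have hbc := pvCeil_bracket (PySem.Str.len text) (max 1 (ss - ov)) hstep
    have hcc1 : 0 ≤ -(PySem.Int.floordiv (-(PySem.Str.len text)) (max 1 (ss - ov))) - 1 := by
      by_contra h
      have h1 : -(PySem.Int.floordiv (-(PySem.Str.len text)) (max 1 (ss - ov))) ≤ 0 := by omega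
      nlinarith [hbc.2, hlen, hstep]
    have := pvLoopA_eq_range (PySem.Str.len text) ss (max 1 (ss - ov)) _ _ hstep hb0 hbc
      0 le_rfl (by simp only [le_min_iff]; exact ⟨le_max_left _ _, hcc1⟩)
    simpa using this
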